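-- pv_equiv track=rewrite | github.com/LetThemSee/SMIRKs | SMIRKs_head.py | determine_edge
-- ===== SOURCE A (Python) =====
-- def determine_edge(hist, median):
--     width = len(hist)
--
--     count = 0
--     for i in range(width):
--         if hist[i] > median and count == 0:
--             count += 1
--             start = i - 1
--
--         if hist[i] <= median and count == 1:
--             end = i
--             break
--     return start, end
-- ===== SOURCE B (Python) =====
-- def determine_edge(hist, median):
--     start = min(i for i, h in enumerate(hist) if h > median) - 1
--     end = min(i for i, h in enumerate(hist) if i > start + 1 and h <= median)
--     return start, end
-- ===== Notes on version B (the rewrite author's own statement) =====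
-- stated objective: alternative
-- what changed: Replaced A's single stateful scan with a flag and break by a declarative collect-and-aggregate formulation: the rising edge is min of all indices whose value exceeds the median, and the falling edge is min of all later indices whose value is at or below it; no loop state, no early exit.
import Mathlib
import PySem

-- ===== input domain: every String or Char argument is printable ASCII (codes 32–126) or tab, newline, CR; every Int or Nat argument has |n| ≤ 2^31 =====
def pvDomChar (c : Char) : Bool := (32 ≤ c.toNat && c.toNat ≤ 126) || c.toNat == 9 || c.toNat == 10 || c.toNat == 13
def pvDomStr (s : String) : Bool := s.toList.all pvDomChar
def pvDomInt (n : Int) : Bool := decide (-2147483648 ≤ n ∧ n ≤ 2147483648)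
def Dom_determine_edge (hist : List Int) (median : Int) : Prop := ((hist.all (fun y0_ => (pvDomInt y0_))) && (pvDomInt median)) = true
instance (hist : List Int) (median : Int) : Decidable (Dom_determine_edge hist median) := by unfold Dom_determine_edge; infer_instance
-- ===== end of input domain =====

-- B replaces A's stateful flag-and-break scan by a collect-and-aggregate formulation:
-- min over all indices above the median, then min over all later indices at or below it.
-- Same values, same O(n); inputs where both Pythons raise are excluded by Pre_ (the ports
-- render an unbound local / empty min as 0 there).

-- ===== PORT A =====
-- loop state: count, start?, end?; `break` is the early return in the second branch
def goA (median : Int) : List Int → Int → Int → Option Int → Option Int → (Option Int × Option Int)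
  | [], _, _, s, e => (s, e)
  | h :: t, i, count, s, e =>
    let count' := if h > median ∧ count = 0 then count + 1 else count
    let s' := if h > median ∧ count = 0 then some (i - 1) else s
    if h ≤ median ∧ count' = 1 then (s', some i)
    else goA median t (i + 1) count' s' e

def determine_edge (hist : List Int) (median : Int) : Int × Int :=
  let (s, e) := goA median hist 0 0 none none
  (s.getD 0, e.getD 0)

-- ===== PORT B =====
-- the generator (i for i, h in enumerate(hist) if h > median)
def idxAbove (hist : List Int) (median : Int) : List Int :=
  (PySem.List.enumerate hist).filterMap (fun p => if p.2 > median then some p.1 else none)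

-- the generator (i for i, h in enumerate(hist) if i > bound and h <= median)
def idxBelowAfter (hist : List Int) (median bound : Int) : List Int :=
  (PySem.List.enumerate hist).filterMap
    (fun p => if p.1 > bound ∧ p.2 ≤ median then some p.1 else none)

def determine_edge_alt (hist : List Int) (median : Int) : Int × Int :=
  match PySem.List.min? (idxAbove hist median) (fun x => x) with
  | none => (0, 0)                       -- min() on empty: start unbound
  | some m =>
    let start := m - 1
    match PySem.List.min? (idxBelowAfter hist median (start + 1)) (fun x => x) with
    | none => (start, 0)                 -- end unbound
    | some e => (start, e)

-- ===== PRECONDITION & SPEC =====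
-- Pre_ excludes exactly the inputs where Python A raises UnboundLocalError: no element above
-- the median, or no element ≤ median after the first one above it (B raises ValueError there).
def Pre_determine_edge (hist : List Int) (median : Int) : Prop :=
  ∃ i : Fin hist.length, median < hist[i] ∧
    ∃ j : Fin hist.length, (i : ℕ) < (j : ℕ) ∧ hist[j] ≤ median
instance (hist : List Int) (median : Int) : Decidable (Pre_determine_edge hist median) := by
  unfold Pre_determine_edge; infer_instance
def pvWitness_determine_edge : List Int × Int := ([0, 1, 0], 0)

def Spec_determine_edge (hist : List Int) (median : Int) (out : Int × Int) : Prop := out = determine_edge_alt hist median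
instance (hist : List Int) (median : Int) (out : Int × Int) : Decidable (Spec_determine_edge hist median out) := by unfold Spec_determine_edge; infer_instance

-- ===== CLAIM (what is proved, stated in full; the proofs are below) =====
def Claim_equal_determine_edge : Prop := ∀ (hist : List Int) (median : Int), Dom_determine_edge hist median → Pre_determine_edge hist median → Spec_determine_edge hist median (determine_edge hist median)

-- ===== LEMMAS AND PROOFS =====

-- proof-side first-match scans, the common intermediate between the two ports
def goB1 (median : Int) : List Int → Int → Option (Int × List Int)
  | [], _ => none
  | h :: t, i => if h > median then some (i, t) else goB1 median t (i + 1)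

def goB2 (median : Int) : List Int → Int → Option Int
  | [], _ => none
  | h :: t, i => if h ≤ median then some i else goB2 median t (i + 1)

-- parametrised form of the two comprehensions, with the enumerate start exposed
def fIdx (P : Int → Int → Prop) [inst : ∀ i h, Decidable (P i h)]
    (t : List Int) (i : Int) : List Int :=
  (PySem.List.enumerate t i).filterMap (fun p => if P p.1 p.2 then some p.1 else none)

theorem fIdx_cons (P : Int → Int → Prop) [inst : ∀ i h, Decidable (P i h)]
    (h : Int) (t : List Int) (i : Int) :
    fIdx P (h :: t) i = (if P i h then i :: fIdx P t (i + 1) else fIdx P t (i + 1)) := by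
  simp only [fIdx, PySem.List.enumerate_cons, List.filterMap_cons]
  split_ifs with hp <;> simp

theorem fIdx_lb (P : Int → Int → Prop) [inst : ∀ i h, Decidable (P i h)]
    (t : List Int) (i : Int) : ∀ x ∈ fIdx P t i, i ≤ x := by
  induction t generalizing i with
  | nil => intro x hx; simp [fIdx] at hx
  | cons h rest ih =>
    intro x hx
    rw [fIdx_cons] at hx
    split_ifs at hx with hp
    · rcases List.mem_cons.1 hx with rfl | hx
      · omega
      · have := ih (i + 1) x hx; omega
    · have := ih (i + 1) x hx; omega

-- min of a list whose elements are all ≥ its head is the head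
theorem min?_cons_of_lb (a : Int) (t : List Int) (hlb : ∀ x ∈ t, a ≤ x) :
    PySem.List.min? (a :: t) (fun x => x) = some a := by
  rw [PySem.List.min?_id_cons]
  rcases PySem.List.foldl_min_mem t a with h | h
  · rw [h]
  · have h1 := (PySem.List.foldl_min_le t a).1
    have h2 := hlb _ h
    have : t.foldl min a = a := le_antisymm h1 h2
    rw [this]

theorem goB1_lb (median : Int) (t : List Int) (i k : Int) (rest : List Int)
    (h : goB1 median t i = some (k, rest)) : i ≤ k := by
  induction t generalizing i with
  | nil => simp [goB1] at h
  | cons x rest' ih =>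
    simp only [goB1] at h
    split_ifs at h with hx
    · simp only [Option.some.injEq, Prod.mk.injEq] at h; omega
    · have := ih (i + 1) h; omega

-- the first comprehension's min is the first-match scan
theorem minAbove_eq_goB1 (median : Int) (t : List Int) (i : Int) :
    PySem.List.min? (fIdx (fun _ h => h > median) t i) (fun x => x)
      = (goB1 median t i).map (·.1) := by
  induction t generalizing i with
  | nil => simp [fIdx, goB1, PySem.List.min?, PySem.List.enumerate]
  | cons h rest ih =>
    rw [fIdx_cons]
    simp only [goB1]
    by_cases hgt : h > median
    · rw [if_pos hgt, if_pos hgt,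
        min?_cons_of_lb _ _ (fun x hx => by
          have := fIdx_lb (fun _ h => h > median) rest (i + 1) x hx; omega)]
      rfl
    · rw [if_neg hgt, if_neg hgt, ih]

-- the second comprehension's min, with bound k, skips everything up to index k …
theorem minBelow_after (median k : Int) (t : List Int) (i : Int) (hki : k < i) :
    PySem.List.min? (fIdx (fun j h => j > k ∧ h ≤ median) t i) (fun x => x)
      = goB2 median t i := by
  induction t generalizing i with
  | nil => simp [fIdx, goB2, PySem.List.min?, PySem.List.enumerate]
  | cons h rest ih =>
    rw [fIdx_cons]
    simp only [goB2]
    by_cases hle : h ≤ median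
    · rw [if_pos ⟨hki, hle⟩, if_pos hle,
        min?_cons_of_lb _ _ (fun x hx => by
          have := fIdx_lb (fun j h => j > k ∧ h ≤ median) rest (i + 1) x hx; omega)]
    · have hcond : ¬ (i > k ∧ h ≤ median) := by tauto
      rw [if_neg hcond, if_neg hle]
      exact ih (i + 1) (by omega)

-- … so over the whole list it equals the scan of the suffix behind the rising edge
theorem minBelow_eq_goB2 (median : Int) (t : List Int) (i k : Int) (rest : List Int)
    (h : goB1 median t i = some (k, rest)) :
    PySem.List.min? (fIdx (fun j x => j > k ∧ x ≤ median) t i) (fun x => x)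
      = goB2 median rest (k + 1) := by
  induction t generalizing i with
  | nil => simp [goB1] at h
  | cons x rest' ih =>
    rw [fIdx_cons]
    simp only [goB1] at h
    by_cases hgt : x > median
    · rw [if_pos hgt] at h
      simp only [Option.some.injEq, Prod.mk.injEq] at h
      obtain ⟨rfl, rfl⟩ := h
      rw [if_neg (by omega : ¬ (i > i ∧ x ≤ median))]
      exact minBelow_after median i rest' (i + 1) (by omega)
    · rw [if_neg hgt] at h
      have hik : i + 1 ≤ k := goB1_lb median rest' (i + 1) k rest h
      rw [if_neg (by omega : ¬ (i > k ∧ x ≤ median))]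
      exact ih (i + 1) h

-- A's loop, phase 2 (count = 1) is the first-match scan goB2
theorem goA_phase2 (median : Int) (t : List Int) (i s : Int) :
    goA median t i 1 (some s) none =
      match goB2 median t i with
      | none => (some s, none)
      | some j => (some s, some j) := by
  induction t generalizing i with
  | nil => rfl
  | cons h rest ih =>
    simp only [goA, goB2]
    by_cases hle : h ≤ median
    · have : ¬ (h > median ∧ (1:Int) = 0) := by rintro ⟨hgt, _⟩; omega
      simp [hle]
    · have h1 : ¬ (h > median ∧ (1:Int) = 0) := by rintro ⟨_, h0⟩; omega
      simp [h1, hle, ih]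

-- A's loop, phase 1 (count = 0) runs the scan goB1, then hands over to phase 2
theorem goA_phase1 (median : Int) (t : List Int) (i : Int) :
    goA median t i 0 none none =
      match goB1 median t i with
      | none => (none, none)
      | some (k, rest) => goA median rest (k + 1) 1 (some (k - 1)) none := by
  induction t generalizing i with
  | nil => rfl
  | cons h rest ih =>
    simp only [goA, goB1]
    by_cases hgt : h > median
    · have hle : ¬ h ≤ median := by omega
      simp [hgt, hle]
    · have hle : h ≤ median := by omega
      simp [hgt, hle, ih]

-- the two ports agree on every input (even where both Pythons raise: both render the
-- missing value as 0)
theorem ports_eq (hist : List Int) (median : Int) :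
    determine_edge hist median = determine_edge_alt hist median := by
  unfold determine_edge determine_edge_alt
  have hA : idxAbove hist median = fIdx (fun _ h => h > median) hist 0 := rfl
  rw [goA_phase1, hA, minAbove_eq_goB1]
  cases h1 : goB1 median hist 0 with
  | none => rfl
  | some p =>
    obtain ⟨k, rest⟩ := p
    have hB : idxBelowAfter hist median ((k - 1) + 1)
        = fIdx (fun j x => j > k - 1 + 1 ∧ x ≤ median) hist 0 := rfl
    simp only [goA_phase2, Option.map_some]
    have hk : k - 1 + 1 = k := by omega
    rw [hB, hk, minBelow_eq_goB2 median hist 0 k rest h1]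
    cases h2 : goB2 median rest (k + 1) <;> simp

-- ===== VERDICT (by name: the statement is the Claim_ definition above) =====
theorem determine_edge_spec : Claim_equal_determine_edge := by
  intro hist median _ _
  exact ports_eq hist median
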